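-- pv_equiv track=rewrite | github.com/Celesu/My-Journey | Sh/Shopee_farm/shopee_farm.py | walking_through
-- ===== SOURCE A (Python) =====
-- def walking_through(the_park, the_side, M):
--     possibilities = []
--     sides = []
--     if the_side == 'R':
--         for i in range(1,M+1):
--             total = sum(the_park[-i:])
--             possibilities.append(total)
--             if i == M:
--                 sides.append('R')
--                 possibilities.append(total)
--                 sides.append('L')
--             else:
--                 sides.append('R')
--     else:
--         for i in range(M):
--             total = sum(the_park[:i+1])
--             possibilities.append(total)
--             if i == M-1:
--                 sides.append('L')
--                 possibilities.append(total)
--                 sides.append('R')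
--             else:
--                 sides.append('L')
--
--     return possibilities, sides
-- ===== SOURCE B (Python) =====
-- def walking_through(the_park, the_side, M):
--     if M <= 0:
--         return [], []
--     n = len(the_park)
--     run = 0
--     possibilities = []
--     if the_side == 'R':
--         for i in range(1, M + 1):
--             if i <= n:
--                 run += the_park[n - i]
--             possibilities.append(run)
--         possibilities.append(run)
--         sides = ['R'] * M + ['L']
--     else:
--         for i in range(M):
--             if i < n:
--                 run += the_park[i]
--             possibilities.append(run)
--         possibilities.append(run)
--         sides = ['L'] * M + ['R']
--     return possibilities, sides
-- ===== Notes on version B (the rewrite author's own statement) =====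
-- stated objective: faster
-- what changed: B keeps a single running sum and adds one element per step (clamped at the list length) instead of re-summing a growing slice each iteration, and builds the side labels by list multiplication instead of per-iteration appends with an end-of-loop test.
import Mathlib
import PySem

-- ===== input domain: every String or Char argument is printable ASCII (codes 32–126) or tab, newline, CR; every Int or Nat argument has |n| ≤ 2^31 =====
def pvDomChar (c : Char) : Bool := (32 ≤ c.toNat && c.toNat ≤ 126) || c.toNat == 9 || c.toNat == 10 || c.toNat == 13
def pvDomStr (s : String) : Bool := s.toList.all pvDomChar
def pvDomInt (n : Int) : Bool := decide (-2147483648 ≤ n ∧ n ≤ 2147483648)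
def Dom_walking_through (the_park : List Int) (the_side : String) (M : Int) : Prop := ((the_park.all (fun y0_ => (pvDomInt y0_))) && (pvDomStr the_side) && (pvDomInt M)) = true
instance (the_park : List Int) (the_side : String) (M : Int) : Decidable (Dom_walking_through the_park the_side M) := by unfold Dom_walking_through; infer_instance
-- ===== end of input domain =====

-- B replaces A's per-step re-summing of a slice by a single running sum (one element added per
-- step, clamped at the list length) and builds the side labels by replication; objective: faster.

-- ===== PORT A =====
def walking_through (the_park : List Int) (the_side : String) (M : Int) : List Int × List String :=
  if the_side = "R" then
    (PySem.List.pyRange 1 (M + 1) 1).foldl (fun (st : List Int × List String) i =>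
      let total := (PySem.List.slice the_park (some (-i)) none).sum
      let poss := st.1 ++ [total]
      if i = M then (poss ++ [total], st.2 ++ ["R", "L"]) else (poss, st.2 ++ ["R"]))
      ([], [])
  else
    (PySem.List.pyRange 0 M 1).foldl (fun (st : List Int × List String) i =>
      let total := (PySem.List.slice the_park none (some (i + 1))).sum
      let poss := st.1 ++ [total]
      if i = M - 1 then (poss ++ [total], st.2 ++ ["L", "R"]) else (poss, st.2 ++ ["L"]))
      ([], [])

-- ===== PORT B =====
def walking_through_alt (the_park : List Int) (the_side : String) (M : Int) : List Int × List String :=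
  if M ≤ 0 then ([], [])
  else
    let n : Int := the_park.length
    if the_side = "R" then
      let st := (PySem.List.pyRange 1 (M + 1) 1).foldl (fun (st : Int × List Int) i =>
        let run := if i ≤ n then st.1 + PySem.List.pyGetD the_park (n - i) 0 else st.1
        (run, st.2 ++ [run])) (0, [])
      (st.2 ++ [st.1], List.replicate M.toNat "R" ++ ["L"])
    else
      let st := (PySem.List.pyRange 0 M 1).foldl (fun (st : Int × List Int) i =>
        let run := if i < n then st.1 + PySem.List.pyGetD the_park i 0 else st.1
        (run, st.2 ++ [run])) (0, [])
      (st.2 ++ [st.1], List.replicate M.toNat "L" ++ ["R"])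

-- ===== PRECONDITION & SPEC =====
def Spec_walking_through (the_park : List Int) (the_side : String) (M : Int) (out : List Int × List String) : Prop := out = walking_through_alt the_park the_side M
instance (the_park : List Int) (the_side : String) (M : Int) (out : List Int × List String) : Decidable (Spec_walking_through the_park the_side M out) := by unfold Spec_walking_through; infer_instance

-- ===== CLAIM (what is proved, stated in full; the proofs are below) =====
def Claim_equal_walking_through : Prop := ∀ (the_park : List Int) (the_side : String) (M : Int), Dom_walking_through the_park the_side M → Spec_walking_through the_park the_side M (walking_through the_park the_side M)

-- ===== LEMMAS AND PROOFS =====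

-- suffix sum of the last k elements (clamped) and prefix sum of the first k elements
def sufSum (xs : List Int) (k : Nat) : Int := (xs.drop (xs.length - k)).sum
def preSum (xs : List Int) (k : Nat) : Int := (xs.take k).sum

lemma sufSum_succ (xs : List Int) (k : Nat) :
    sufSum xs (k + 1) =
      sufSum xs k + (if (k : Int) + 1 ≤ (xs.length : Int) then xs.getD (xs.length - (k + 1)) 0 else 0) := by
  unfold sufSum
  by_cases h : k + 1 ≤ xs.length
  · have hlt : xs.length - (k + 1) < xs.length := by omega
    rw [List.drop_eq_getElem_cons hlt]
    have h2 : xs.length - (k + 1) + 1 = xs.length - k := by omega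
    rw [h2]
    have : (k : Int) + 1 ≤ (xs.length : Int) := by exact_mod_cast h
    simp [this, List.getD_eq_getElem?_getD, List.getElem?_eq_getElem hlt]
    ring
  · have h1 : xs.length - (k + 1) = xs.length - k := by omega
    have h2 : ¬ ((k : Int) + 1 ≤ (xs.length : Int)) := by
      intro hc; apply h; exact_mod_cast hc
    simp [h1, h2]

lemma preSum_succ (xs : List Int) (k : Nat) :
    preSum xs (k + 1) =
      preSum xs k + (if (k : Int) < (xs.length : Int) then xs.getD k 0 else 0) := by
  unfold preSum
  by_cases h : k < xs.length
  · have hi : (k : Int) < (xs.length : Int) := by exact_mod_cast h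
    rw [List.take_succ, List.getElem?_eq_getElem h, if_pos hi, List.getD_eq_getElem?_getD,
        List.getElem?_eq_getElem h]
    simp only [Option.toList_some, Option.getD_some, List.sum_append, List.sum_cons, List.sum_nil]
    omega
  · have hi : ¬ ((k : Int) < (xs.length : Int)) := by exact_mod_cast h
    have hnone : xs[k]? = none := by
      rw [List.getElem?_eq_none_iff]; omega
    rw [List.take_succ, hnone, if_neg hi]
    simp

-- B's R-side loop closed form
lemma loopR_B (xs : List Int) (m : Nat) :
    (PySem.List.pyRange 1 ((m : Int) + 1) 1).foldl (fun (st : Int × List Int) i =>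
        let run := if i ≤ (xs.length : Int) then st.1 + PySem.List.pyGetD xs ((xs.length : Int) - i) 0 else st.1
        (run, st.2 ++ [run])) (0, []) =
      (sufSum xs m, (List.range m).map (fun k => sufSum xs (k + 1))) := by
  induction m with
  | zero => simp [PySem.List.pyRange_one_eq_nil, sufSum]
  | succ m ih =>
    rw [show ((m + 1 : Nat) : Int) + 1 = ((m : Int) + 1) + 1 by push_cast; ring,
        PySem.List.pyRange_one_succ_right (by omega), List.foldl_append, ih]
    simp only [List.foldl_cons, List.foldl_nil]
    have hstep : (if (m : Int) + 1 ≤ (xs.length : Int) then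
          sufSum xs m + PySem.List.pyGetD xs ((xs.length : Int) - ((m : Int) + 1)) 0 else sufSum xs m)
        = sufSum xs (m + 1) := by
      rw [sufSum_succ]
      by_cases h : (m : Int) + 1 ≤ (xs.length : Int)
      · have hn : m + 1 ≤ xs.length := by exact_mod_cast h
        have hc : (xs.length : Int) - ((m : Int) + 1) = ((xs.length - (m + 1) : Nat) : Int) := by
          push_cast; omega
        simp [h, hc, PySem.List.pyGetD_natCast]
      · simp [h]
    simp only [hstep]
    rw [List.range_succ]
    simp

-- B's L-side loop closed form
lemma loopL_B (xs : List Int) (m : Nat) :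
    (PySem.List.pyRange 0 (m : Int) 1).foldl (fun (st : Int × List Int) i =>
        let run := if i < (xs.length : Int) then st.1 + PySem.List.pyGetD xs i 0 else st.1
        (run, st.2 ++ [run])) (0, []) =
      (preSum xs m, (List.range m).map (fun k => preSum xs (k + 1))) := by
  induction m with
  | zero => simp [PySem.List.pyRange_one_eq_nil, preSum]
  | succ m ih =>
    rw [show ((m + 1 : Nat) : Int) = (m : Int) + 1 by push_cast; ring,
        PySem.List.pyRange_one_succ_right (by omega), List.foldl_append, ih]
    simp only [List.foldl_cons, List.foldl_nil]
    have hstep : (if (m : Int) < (xs.length : Int) then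
          preSum xs m + PySem.List.pyGetD xs (m : Int) 0 else preSum xs m)
        = preSum xs (m + 1) := by
      rw [preSum_succ]
      by_cases h : (m : Int) < (xs.length : Int)
      · simp [h, PySem.List.pyGetD_natCast]
      · simp [h]
    simp only [hstep]
    rw [List.range_succ]
    simp

-- the slice sums A computes are the suffix/prefix sums
lemma sliceR_eq (xs : List Int) (k : Nat) :
    (PySem.List.slice xs (some (-((k : Int) + 1))) none).sum = sufSum xs (k + 1) := by
  have : (-((k : Int) + 1)) = -(((k + 1 : Nat) : Int)) := by push_cast; ring
  rw [this, PySem.List.slice_from_neg_natCast xs (k + 1) (by omega)]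
  rfl

lemma sliceL_eq (xs : List Int) (k : Nat) :
    (PySem.List.slice xs none (some ((k : Int) + 1))).sum = preSum xs (k + 1) := by
  have : ((k : Int) + 1) = ((k + 1 : Nat) : Int) := by push_cast; ring
  rw [this, PySem.List.slice_to_natCast]
  rfl

-- A's R-side loop, stopped before the final i = M step
lemma loopR_A (xs : List Int) (M : Int) (m : Nat) (h : (m : Int) < M) :
    (PySem.List.pyRange 1 ((m : Int) + 1) 1).foldl (fun (st : List Int × List String) i =>
        let total := (PySem.List.slice xs (some (-i)) none).sum
        let poss := st.1 ++ [total]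
        if i = M then (poss ++ [total], st.2 ++ ["R", "L"]) else (poss, st.2 ++ ["R"]))
      ([], []) =
      ((List.range m).map (fun k => sufSum xs (k + 1)), List.replicate m "R") := by
  induction m with
  | zero => simp [PySem.List.pyRange_one_eq_nil]
  | succ m ih =>
    rw [show ((m + 1 : Nat) : Int) + 1 = ((m : Int) + 1) + 1 by push_cast; ring,
        PySem.List.pyRange_one_succ_right (by omega), List.foldl_append, ih (by omega)]
    simp only [List.foldl_cons, List.foldl_nil]
    have hne : ((m : Int) + 1) ≠ M := by omega
    simp only [hne, if_false, sliceR_eq]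
    rw [List.range_succ, List.replicate_succ']
    simp

-- A's L-side loop, stopped before the final i = M - 1 step
lemma loopL_A (xs : List Int) (M : Int) (m : Nat) (h : (m : Int) < M) :
    (PySem.List.pyRange 0 (m : Int) 1).foldl (fun (st : List Int × List String) i =>
        let total := (PySem.List.slice xs none (some (i + 1))).sum
        let poss := st.1 ++ [total]
        if i = M - 1 then (poss ++ [total], st.2 ++ ["L", "R"]) else (poss, st.2 ++ ["L"]))
      ([], []) =
      ((List.range m).map (fun k => preSum xs (k + 1)), List.replicate m "L") := by
  induction m with
  | zero => simp [PySem.List.pyRange_one_eq_nil]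
  | succ m ih =>
    rw [show ((m + 1 : Nat) : Int) = (m : Int) + 1 by push_cast; ring,
        PySem.List.pyRange_one_succ_right (by omega), List.foldl_append, ih (by omega)]
    simp only [List.foldl_cons, List.foldl_nil]
    have hne : (m : Int) ≠ M - 1 := by omega
    simp only [hne, if_false, sliceL_eq]
    rw [List.range_succ, List.replicate_succ']
    simp

-- ===== VERDICT (by name: the statement is the Claim_ definition above) =====
theorem walking_through_spec : Claim_equal_walking_through := by
  intro xs side M _
  show walking_through xs side M = walking_through_alt xs side M
  unfold walking_through walking_through_alt
  by_cases hM : M ≤ 0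
  · have hR : PySem.List.pyRange 1 (M + 1) 1 = [] := PySem.List.pyRange_one_eq_nil (by omega)
    have hL : PySem.List.pyRange 0 M 1 = [] := PySem.List.pyRange_one_eq_nil (by omega)
    simp [hM, hR, hL]
  · obtain ⟨m, rfl⟩ : ∃ m : Nat, M = (m : Int) + 1 := ⟨(M - 1).toNat, by omega⟩
    have hcast : ((m : Int) + 1) + 1 = ((m + 1 : Nat) : Int) + 1 := by push_cast; ring
    have htoNat : ((m : Int) + 1).toNat = m + 1 := by omega
    have hsplit : PySem.List.pyRange 1 (((m : Int) + 1) + 1) 1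
        = PySem.List.pyRange 1 ((m : Int) + 1) 1 ++ [(m : Int) + 1] :=
      PySem.List.pyRange_one_succ_right (by omega)
    have hsplitL : PySem.List.pyRange 0 ((m : Int) + 1) 1
        = PySem.List.pyRange 0 (m : Int) 1 ++ [(m : Int)] :=
      PySem.List.pyRange_one_succ_right (by omega)
    by_cases hs : side = "R"
    · have hA : (PySem.List.pyRange 1 (((m : Int) + 1) + 1) 1).foldl
          (fun (st : List Int × List String) i =>
            let total := (PySem.List.slice xs (some (-i)) none).sum
            let poss := st.1 ++ [total]
            if i = (m : Int) + 1 then (poss ++ [total], st.2 ++ ["R", "L"]) else (poss, st.2 ++ ["R"]))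
          ([], []) =
          ((List.range m).map (fun k => sufSum xs (k + 1)) ++ [sufSum xs (m + 1), sufSum xs (m + 1)],
           List.replicate m "R" ++ ["R", "L"]) := by
        rw [hsplit, List.foldl_append, loopR_A xs ((m : Int) + 1) m (by omega)]
        have hsl : (PySem.List.slice xs (some (-1 + -(m : Int))) none).sum = sufSum xs (m + 1) := by
          rw [show (-1 + -(m : Int)) = -((m : Int) + 1) by ring]; exact sliceR_eq xs m
        simp [hsl]
      have hB : (PySem.List.pyRange 1 (((m : Int) + 1) + 1) 1).foldl
          (fun (st : Int × List Int) i =>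
            let run := if i ≤ (xs.length : Int) then st.1 + PySem.List.pyGetD xs ((xs.length : Int) - i) 0 else st.1
            (run, st.2 ++ [run])) (0, []) =
          (sufSum xs (m + 1), (List.range (m + 1)).map (fun k => sufSum xs (k + 1))) := by
        rw [hcast, loopR_B xs (m + 1)]
      simp only [hM, hs, if_false, hA, hB, htoNat]
      rw [List.range_succ, List.replicate_succ']
      simp
    · have hA : (PySem.List.pyRange 0 ((m : Int) + 1) 1).foldl
          (fun (st : List Int × List String) i =>
            let total := (PySem.List.slice xs none (some (i + 1))).sum
            let poss := st.1 ++ [total]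
            if i = ((m : Int) + 1) - 1 then (poss ++ [total], st.2 ++ ["L", "R"]) else (poss, st.2 ++ ["L"]))
          ([], []) =
          ((List.range m).map (fun k => preSum xs (k + 1)) ++ [preSum xs (m + 1), preSum xs (m + 1)],
           List.replicate m "L" ++ ["L", "R"]) := by
        rw [hsplitL, List.foldl_append]
        have : (PySem.List.pyRange 0 (m : Int) 1).foldl
            (fun (st : List Int × List String) i =>
              let total := (PySem.List.slice xs none (some (i + 1))).sum
              let poss := st.1 ++ [total]
              if i = ((m : Int) + 1) - 1 then (poss ++ [total], st.2 ++ ["L", "R"]) else (poss, st.2 ++ ["L"]))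
            ([], []) =
            ((List.range m).map (fun k => preSum xs (k + 1)), List.replicate m "L") := by
          have heq : ((m : Int) + 1) - 1 = (m : Int) + 1 - 1 := rfl
          have := loopL_A xs ((m : Int) + 1) m (by omega)
          simpa using this
        rw [this]
        simp [sliceL_eq]
      have hB : (PySem.List.pyRange 0 ((m : Int) + 1) 1).foldl
          (fun (st : Int × List Int) i =>
            let run := if i < (xs.length : Int) then st.1 + PySem.List.pyGetD xs i 0 else st.1
            (run, st.2 ++ [run])) (0, []) =
          (preSum xs (m + 1), (List.range (m + 1)).map (fun k => preSum xs (k + 1))) := by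
        have : ((m : Int) + 1) = ((m + 1 : Nat) : Int) := by push_cast; ring
        rw [this, loopL_B xs (m + 1)]
      simp only [hM, hs, if_false, hA, hB, htoNat]
      rw [List.range_succ, List.replicate_succ']
      simp
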